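-- pv_equiv track=rewrite | github.com/frederic-junier/BCPST | TP3/TP_Listes_852_2016-2017.py | suite_exo11V2
-- ===== SOURCE A (Python) =====
-- def suite_exo11V2(n):
--     somme = 1
--     sommepond = 0
--     u = 1
--     for i in range(1, n + 1):
--         u = (i - 1)*somme + sommepond
--         somme = somme + u
--         sommepond = sommepond + i*u
--     return u
-- ===== SOURCE B (Python) =====
-- def suite_exo11V2(n):
--     # Two-term recurrence u_k = 2*k*u_{k-1} - 2*(k-2)*u_{k-2}, keeping only the
--     # last two values instead of the running sums somme/sommepond.
--     if n <= 0:
--         return 1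
--     if n == 1:
--         return 0
--     prev2, prev1 = 0, 1  # u_1, u_2
--     for k in range(3, n + 1):
--         prev2, prev1 = prev1, 2 * k * prev1 - 2 * (k - 2) * prev2
--     return prev1
-- ===== Notes on version B (the rewrite author's own statement) =====
-- stated objective: alternative
-- what changed: B replaces the three-variable loop over somme/sommepond/u by the derived standalone two-term recurrence u_k = 2*k*u_{k-1} - 2*(k-2)*u_{k-2}, keeping only the last two sequence values and special-casing n<=1.
import Mathlib
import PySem

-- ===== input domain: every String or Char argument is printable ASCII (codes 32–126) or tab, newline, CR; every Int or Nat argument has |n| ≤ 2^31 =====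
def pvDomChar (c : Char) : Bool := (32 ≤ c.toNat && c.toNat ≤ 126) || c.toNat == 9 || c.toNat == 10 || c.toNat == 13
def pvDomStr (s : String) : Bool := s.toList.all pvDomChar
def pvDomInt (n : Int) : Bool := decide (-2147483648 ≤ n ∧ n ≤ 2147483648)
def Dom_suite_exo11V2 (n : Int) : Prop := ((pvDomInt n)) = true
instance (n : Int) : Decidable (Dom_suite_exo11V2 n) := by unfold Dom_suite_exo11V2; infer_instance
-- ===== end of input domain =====

-- B computes the same sequence via the standalone two-term recurrence
-- u_k = 2*k*u_{k-1} - 2*(k-2)*u_{k-2}, keeping two values instead of A's running sums.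

-- loop bodies of the two ports, as named step functions
def pvStepA (st : Int × Int × Int) (i : Int) : Int × Int × Int :=
  let u := (i - 1) * st.1 + st.2.1
  (st.1 + u, st.2.1 + i * u, u)

def pvStepB (p : Int × Int) (k : Int) : Int × Int := (p.2, 2 * k * p.2 - 2 * (k - 2) * p.1)

-- ===== PORT A =====
def suite_exo11V2 (n : Int) : Int :=
  let st := (PySem.List.pyRange 1 (n + 1) 1).foldl pvStepA (1, 0, 1)
  st.2.2

-- ===== PORT B =====
def suite_exo11V2_alt (n : Int) : Int :=
  if n ≤ 0 then 1
  else if n = 1 then 0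
  else
    ((PySem.List.pyRange 3 (n + 1) 1).foldl pvStepB (0, 1)).2

-- ===== PRECONDITION & SPEC =====
def Spec_suite_exo11V2 (n : Int) (out : Int) : Prop := out = suite_exo11V2_alt n
instance (n : Int) (out : Int) : Decidable (Spec_suite_exo11V2 n out) := by unfold Spec_suite_exo11V2; infer_instance

-- ===== CLAIM (what is proved, stated in full; the proofs are below) =====
def Claim_equal_suite_exo11V2 : Prop := ∀ (n : Int), Dom_suite_exo11V2 n → Spec_suite_exo11V2 n (suite_exo11V2 n)

-- ===== LEMMAS AND PROOFS =====

-- Invariant: after processing i = 1..m (m ≥ 2), with (x, y) = B's state after k = 3..m,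
-- A's state is (2y - 2(m-1)x, 2y + 2(m-1)^2 x, y).
theorem pv_invariant (m : Nat) :
    (PySem.List.pyRange 1 ((m : Int) + 2 + 1) 1).foldl pvStepA (1, 0, 1) =
      (let p := (PySem.List.pyRange 3 ((m : Int) + 2 + 1) 1).foldl pvStepB (0, 1)
       (2 * p.2 - 2 * ((m : Int) + 1) * p.1,
        2 * p.2 + 2 * ((m : Int) + 1) ^ 2 * p.1, p.2)) := by
  induction m with
  | zero => decide
  | succ k ih =>
      push_cast
      have h1 : ((k : Int) + 1) + 2 + 1 = (((k : Int) + 2 + 1) + 1) := by ring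
      have h2 : (1 : Int) ≤ (k : Int) + 2 + 1 := by omega
      have h3 : (3 : Int) ≤ (k : Int) + 2 + 1 := by omega
      rw [h1, PySem.List.pyRange_one_succ_right h2,
          PySem.List.pyRange_one_succ_right h3,
          List.foldl_append, List.foldl_append, ih]
      simp only [List.foldl_cons, List.foldl_nil, pvStepA, pvStepB]
      simp only [Prod.mk.injEq]
      refine ⟨by ring, by ring, by ring⟩

theorem suite_exo11V2_eq_alt (n : Int) : suite_exo11V2 n = suite_exo11V2_alt n := by
  rcases le_or_gt n 0 with h | h
  · -- empty loop on both sides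
    unfold suite_exo11V2 suite_exo11V2_alt
    rw [PySem.List.pyRange_one_eq_nil (by omega : n + 1 ≤ 1)]
    simp [h]
  · rcases eq_or_lt_of_le (by omega : (1 : Int) ≤ n) with h1 | h1
    · -- n = 1
      unfold suite_exo11V2 suite_exo11V2_alt
      subst h1
      decide
    · -- n ≥ 2 : use the invariant at m = n - 2
      obtain ⟨m, hm⟩ : ∃ m : Nat, n = (m : Int) + 2 :=
        ⟨(n - 2).toNat, by omega⟩
      subst hm
      unfold suite_exo11V2 suite_exo11V2_alt
      rw [pv_invariant m]
      have hne : ¬ ((m : Int) + 2 ≤ 0) := by omega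
      have hne1 : ¬ ((m : Int) + 2 = 1) := by omega
      simp [hne, hne1]

-- ===== VERDICT (by name: the statement is the Claim_ definition above) =====
theorem suite_exo11V2_spec : Claim_equal_suite_exo11V2 := by
  intro n _
  exact suite_exo11V2_eq_alt n
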